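-- pv_equiv track=rewrite | github.com/desihub/prospect | py/prospect/mycoaddcam.py | index_dichotomy
-- ===== SOURCE A (Python) =====
-- import math
--
-- def index_dichotomy(point, grid) :
--     """
--     Translated from js/interp_grid.js
--     Find nearest index in grid, left from point; use dichotomy method
--     """
--     if ( point < grid[0] ) : return 0
--     if ( point > grid[-1] ) : return len(grid)-2
--     i_left = 0
--     i_center = 0
--     i_right = len(grid)-1
--     while ( i_right - i_left != 1) :
--         i_center = i_left + math.floor((i_right-i_left)/2)
--         if ( point >= grid[i_center] ) :
--             i_left = i_center
--         else :
--             i_right = i_center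
--     return i_left
-- ===== SOURCE B (Python) =====
-- def index_dichotomy(point, grid):
--     """
--     Find nearest index in grid, left from point: recursive bisection.
--     """
--     if point < grid[0]:
--         return 0
--     if point > grid[-1]:
--         return len(grid) - 2
--     def bisect(lo, hi):
--         if hi - lo == 1:
--             return lo
--         mid = (lo + hi) // 2
--         return bisect(mid, hi) if point >= grid[mid] else bisect(lo, mid)
--     return bisect(0, len(grid) - 1)
-- ===== Notes on version B (the rewrite author's own statement) =====
-- stated objective: alternative
-- what changed: Replaces the while-loop with three mutable indices by a recursive bisection helper carrying only (lo, hi), with the midpoint computed as (lo+hi)//2 instead of lo+math.floor((hi-lo)/2).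
import Mathlib
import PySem

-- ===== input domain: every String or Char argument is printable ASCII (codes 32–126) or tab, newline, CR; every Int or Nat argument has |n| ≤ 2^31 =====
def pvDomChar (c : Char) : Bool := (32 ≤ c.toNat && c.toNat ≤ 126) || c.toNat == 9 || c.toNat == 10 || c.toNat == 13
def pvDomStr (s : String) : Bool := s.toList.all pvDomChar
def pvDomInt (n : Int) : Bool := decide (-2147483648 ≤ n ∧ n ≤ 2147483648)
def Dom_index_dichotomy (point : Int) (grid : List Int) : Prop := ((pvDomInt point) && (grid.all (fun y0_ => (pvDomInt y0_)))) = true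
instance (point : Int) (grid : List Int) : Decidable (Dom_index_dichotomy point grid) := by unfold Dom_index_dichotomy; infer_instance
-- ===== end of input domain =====

-- B replaces the three-mutable-index while-loop by a recursive bisection helper on (lo, hi)
-- with the midpoint written (lo+hi)//2; objective: alternative decomposition, same cost.

-- ===== PORT A =====
-- the while-loop of A; the fuel only makes it total (inside Pre_ the loop terminates
-- and the fuel is never exhausted)
def idLoopA (point : Int) (grid : List Int) : Nat → Int → Int → Int
  | 0, i_left, _ => i_left
  | fuel + 1, i_left, i_right =>
    if i_right - i_left ≠ 1 then
      let i_center := i_left + PySem.Int.floordiv (i_right - i_left) 2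
      match PySem.List.pyGet? grid i_center with
      | some gc =>
        if point ≥ gc then idLoopA point grid fuel i_center i_right
        else idLoopA point grid fuel i_left i_center
      | none => i_left   -- IndexError (unreachable inside Pre_)
    else i_left

def index_dichotomy (point : Int) (grid : List Int) : Int :=
  match PySem.List.pyGet? grid 0, PySem.List.pyGet? grid (-1) with
  | some g0, some gl =>
    if point < g0 then 0
    else if point > gl then (grid.length : Int) - 2
    else idLoopA point grid (grid.length + 1) 0 ((grid.length : Int) - 1)
  | _, _ => 0   -- grid = []: Python raises IndexError (excluded by Pre_)

-- ===== PORT B =====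
-- B's recursive bisection helper; the 'hwf : 2 ≤ hi - lo' branch guard only justifies
-- termination (it always holds when the 'hi - lo == 1' base case fails inside Pre_)
def idBisectB (point : Int) (grid : List Int) (lo hi : Int) : Int :=
  if hi - lo = 1 then lo
  else
    let mid := PySem.Int.floordiv (lo + hi) 2
    if _hwf : 2 ≤ hi - lo then
      match PySem.List.pyGet? grid mid with
      | some gm =>
        if point ≥ gm then idBisectB point grid mid hi else idBisectB point grid lo mid
      | none => lo   -- IndexError (unreachable inside Pre_)
    else lo   -- hi - lo ≤ 0: Python B recurses forever (unreachable inside Pre_)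
termination_by (hi - lo).toNat
decreasing_by
  · have h : PySem.Int.floordiv (lo + hi) 2 = (lo + hi) / 2 := by
      simp only [PySem.Int.floordiv]
      exact Int.fdiv_eq_ediv_of_nonneg _ (by omega)
    simp only [h]; omega
  · have h : PySem.Int.floordiv (lo + hi) 2 = (lo + hi) / 2 := by
      simp only [PySem.Int.floordiv]
      exact Int.fdiv_eq_ediv_of_nonneg _ (by omega)
    simp only [h]; omega

def index_dichotomy_alt (point : Int) (grid : List Int) : Int :=
  match PySem.List.pyGet? grid 0 with
  | none => 0   -- grid = []: IndexError (excluded by Pre_)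
  | some g0 =>
    match PySem.List.pyGet? grid (-1) with
    | none => 0
    | some gl =>
      if point < g0 then 0
      else if point > gl then (grid.length : Int) - 2
      else idBisectB point grid 0 ((grid.length : Int) - 1)

-- ===== PRECONDITION & SPEC =====
-- Pre_ excludes the empty grid (A raises IndexError) and the one-element grid with
-- point == grid[0] (A's while-loop never terminates); everything else is admitted.
def Pre_index_dichotomy (point : Int) (grid : List Int) : Prop :=
  2 ≤ grid.length ∨ (grid.length = 1 ∧ point ≠ grid.headD 0)

instance (point : Int) (grid : List Int) : Decidable (Pre_index_dichotomy point grid) := by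
  unfold Pre_index_dichotomy; infer_instance

def pvWitness_index_dichotomy : Int × List Int := (3, [1, 2, 5, 9])

def Spec_index_dichotomy (point : Int) (grid : List Int) (out : Int) : Prop := out = index_dichotomy_alt point grid
instance (point : Int) (grid : List Int) (out : Int) : Decidable (Spec_index_dichotomy point grid out) := by unfold Spec_index_dichotomy; infer_instance

-- ===== CLAIM (what is proved, stated in full; the proofs are below) =====
def Claim_equal_index_dichotomy : Prop := ∀ (point : Int) (grid : List Int), Dom_index_dichotomy point grid → Pre_index_dichotomy point grid → Spec_index_dichotomy point grid (index_dichotomy point grid)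

-- ===== LEMMAS AND PROOFS =====

-- the two midpoint formulas agree: l + (r-l)//2 = (l+r)//2
lemma mid_eq (l r : Int) : l + PySem.Int.floordiv (r - l) 2 = PySem.Int.floordiv (l + r) 2 := by
  simp only [PySem.Int.floordiv]
  have h : l + r = (r - l) + l * 2 := by ring
  rw [h, Int.add_mul_fdiv_right _ _ (by omega : (2:Int) ≠ 0)]
  ring

-- with enough fuel and a non-degenerate interval, A's loop is B's bisection
lemma loop_eq_bisect (point : Int) (grid : List Int) (fuel : Nat) (l r : Int)
    (hlr : 1 ≤ r - l) (hfuel : r - l ≤ (fuel : Int)) :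
    idLoopA point grid fuel l r = idBisectB point grid l r := by
  match fuel with
  | 0 => omega
  | fuel + 1 =>
    by_cases hexit : r - l = 1
    · rw [idLoopA, if_neg (by omega), idBisectB, if_pos hexit]
    · have h2 : 2 ≤ r - l := by omega
      have hdiv : PySem.Int.floordiv (r - l) 2 = (r - l) / 2 := by
        simp only [PySem.Int.floordiv]
        exact Int.fdiv_eq_ediv_of_nonneg _ (by omega)
      have hmlo : 1 ≤ (l + PySem.Int.floordiv (r - l) 2) - l := by rw [hdiv]; omega
      have hmhi : 1 ≤ r - (l + PySem.Int.floordiv (r - l) 2) := by rw [hdiv]; omega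
      rw [idLoopA, if_pos hexit, idBisectB, if_neg hexit, dif_pos h2]
      simp only [← mid_eq l r]
      cases hg : PySem.List.pyGet? grid (l + PySem.Int.floordiv (r - l) 2) with
      | none => rfl
      | some gc =>
        dsimp only
        by_cases hp : point ≥ gc
        · simp only [if_pos hp]
          exact loop_eq_bisect point grid fuel _ r hmhi (by rw [hdiv] at hmlo ⊢; omega)
        · simp only [if_neg hp]
          exact loop_eq_bisect point grid fuel l _ hmlo (by rw [hdiv] at hmhi ⊢; omega)

-- ===== VERDICT (by name: the statement is the Claim_ definition above) =====
theorem index_dichotomy_spec : Claim_equal_index_dichotomy := by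
  intro point grid _hdom hpre
  unfold Spec_index_dichotomy index_dichotomy index_dichotomy_alt
  rcases hpre with hn | ⟨h1, hne⟩
  · -- length ≥ 2: guards coincide syntactically, loop = bisection by the lemma
    cases hg0 : PySem.List.pyGet? grid 0 with
    | none =>
      exfalso
      rw [PySem.List.pyGet?_eq_none_iff] at hg0
      exact hg0 (by constructor <;> omega)
    | some g0 =>
      cases hgl : PySem.List.pyGet? grid (-1) with
      | none =>
        exfalso
        rw [PySem.List.pyGet?_eq_none_iff] at hgl
        exact hgl (by constructor <;> omega)
      | some gl =>
        dsimp only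
        by_cases hp0 : point < g0
        · simp only [if_pos hp0]
        · simp only [if_neg hp0]
          by_cases hpl : point > gl
          · simp only [if_pos hpl]
          · simp only [if_neg hpl]
            exact loop_eq_bisect point grid (grid.length + 1) 0 ((grid.length : Int) - 1)
              (by omega) (by push_cast; omega)
  · -- length = 1 and point ≠ grid[0]: one of the two guards fires in both programs
    match grid, h1 with
    | [x], _ =>
      simp only [List.headD_cons] at hne
      have hg0 : PySem.List.pyGet? [x] 0 = some x := rfl
      have hgl : PySem.List.pyGet? [x] (-1) = some x := rfl
      rw [hg0, hgl]
      dsimp only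
      by_cases hp0 : point < x
      · simp only [if_pos hp0]
      · simp only [if_neg hp0, if_pos (by omega : point > x)]
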